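-- pv_equiv track=rewrite | github.com/jcamposv/edcora-finance | backend/app/tools/currency_tools.py | _detect_from_country_context
-- ===== SOURCE A (Python) =====
-- from typing import Dict, Any, Optional, Tuple
--
-- def _detect_from_country_context(phone_number: str) -> Optional[Tuple[str, str]]:
--     """Get (currency_code, symbol) from phone number country code"""
--     clean_phone = phone_number.replace("+", "").replace(" ", "").replace("-", "")
--
--     phone_to_currency = {
--         "506": ("CRC", "₡"),    # Costa Rica
--         "52": ("MXN", "$"),     # Mexico
--         "57": ("COP", "$"),     # Colombia
--         "51": ("PEN", "S/"),    # Peru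
--         "34": ("EUR", "€"),     # Spain
--         "1": ("USD", "$"),      # USA/Canada
--         "507": ("USD", "$"),    # Panama
--         "504": ("HNL", "L"),    # Honduras
--         "503": ("USD", "$"),    # El Salvador
--         "502": ("GTQ", "Q"),    # Guatemala
--     }
--
--     for prefix, currency_info in phone_to_currency.items():
--         if clean_phone.startswith(prefix):
--             return currency_info
--
--     return None
-- ===== SOURCE B (Python) =====
-- def _detect_from_country_context(phone_number):
--     """Get (currency_code, symbol) from phone number country code.
--
--     Longest-prefix-first dict lookup on the cleaned phone string instead of
--     scanning every dict entry with startswith."""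
--     clean_phone = phone_number.replace("+", "").replace(" ", "").replace("-", "")
--
--     phone_to_currency = {
--         "506": ("CRC", "₡"),    # Costa Rica
--         "52": ("MXN", "$"),     # Mexico
--         "57": ("COP", "$"),     # Colombia
--         "51": ("PEN", "S/"),    # Peru
--         "34": ("EUR", "€"),     # Spain
--         "1": ("USD", "$"),      # USA/Canada
--         "507": ("USD", "$"),    # Panama
--         "504": ("HNL", "L"),    # Honduras
--         "503": ("USD", "$"),    # El Salvador
--         "502": ("GTQ", "Q"),    # Guatemala
--     }
--
--     for length in (3, 2, 1):
--         info = phone_to_currency.get(clean_phone[:length])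
--         if info is not None:
--             return info
--     return None
-- ===== Notes on version B (the rewrite author's own statement) =====
-- stated objective: idiomatic
-- what changed: Instead of scanning all 10 dict entries with startswith, B slices the cleaned phone to candidate prefix lengths 3, 2, 1 (no key is a prefix of another, so longest-first direct dict lookups give the same winner) and returns the first dict hit.
import Mathlib
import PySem

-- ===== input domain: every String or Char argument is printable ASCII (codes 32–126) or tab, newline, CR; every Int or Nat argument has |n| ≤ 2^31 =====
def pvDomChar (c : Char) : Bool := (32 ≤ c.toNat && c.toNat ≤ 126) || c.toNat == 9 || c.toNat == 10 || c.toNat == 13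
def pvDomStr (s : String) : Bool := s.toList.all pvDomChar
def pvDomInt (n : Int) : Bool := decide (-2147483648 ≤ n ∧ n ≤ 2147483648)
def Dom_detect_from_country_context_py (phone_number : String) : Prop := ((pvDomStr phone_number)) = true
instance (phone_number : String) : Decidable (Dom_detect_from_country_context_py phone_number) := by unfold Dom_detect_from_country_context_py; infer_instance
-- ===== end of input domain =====

-- ===== PORT A =====
-- B keeps A's prefix->currency table and cleaning line; it replaces the
-- startswith scan over all entries by direct dict lookups of the 3/2/1-char slices.
-- shared literal table (the same dict literal appears in both Pythons)
def pvPhoneTable : List (String × String × String) :=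
  [("506", ("CRC", "₡")), ("52", ("MXN", "$")), ("57", ("COP", "$")), ("51", ("PEN", "S/")),
   ("34", ("EUR", "€")), ("1", ("USD", "$")), ("507", ("USD", "$")), ("504", ("HNL", "L")),
   ("503", ("USD", "$")), ("502", ("GTQ", "Q"))]

-- clean_phone = phone_number.replace("+","").replace(" ","").replace("-","")
def pvClean (phone_number : String) : String :=
  PySem.Str.replace (PySem.Str.replace (PySem.Str.replace phone_number "+" "") " " "") "-" ""

-- A's loop: for prefix, currency_info in phone_to_currency.items(): if clean.startswith(prefix): return
def pvLoopA : List (String × String × String) → String → Option (String × String)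
  | [], _ => none
  | (p, ci) :: rest, clean =>
      if PySem.Str.startswith clean p then some ci else pvLoopA rest clean

def detect_from_country_context_py (phone_number : String) : Option (String × String) :=
  pvLoopA (PySem.Dict.ofList pvPhoneTable).items (pvClean phone_number)

-- ===== PORT B =====
-- B's loop: for length in (3, 2, 1): info = d.get(clean[:length]); if info is not None: return info
def pvLookupB (d : PySem.Dict String (String × String)) (clean : String) : List Int → Option (String × String)
  | [] => none
  | L :: rest =>
      match d.get? (PySem.Str.slice clean none (some L)) with
      | some info => some info
      | none => pvLookupB d clean rest

def detect_from_country_context_py_alt (phone_number : String) : Option (String × String) :=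
  pvLookupB (PySem.Dict.ofList pvPhoneTable) (pvClean phone_number) [3, 2, 1]

-- ===== PRECONDITION & SPEC =====
def Spec_detect_from_country_context_py (phone_number : String) (out : Option (String × String)) : Prop := out = detect_from_country_context_py_alt phone_number
instance (phone_number : String) (out : Option (String × String)) : Decidable (Spec_detect_from_country_context_py phone_number out) := by unfold Spec_detect_from_country_context_py; infer_instance

-- ===== CLAIM (what is proved, stated in full; the proofs are below) =====
def Claim_equal_detect_from_country_context_py : Prop := ∀ (phone_number : String), Dom_detect_from_country_context_py phone_number → Spec_detect_from_country_context_py phone_number (detect_from_country_context_py phone_number)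

-- ===== LEMMAS AND PROOFS =====
lemma str_beq_toList (k s : String) : (k == s) = (k.toList == s.toList) := by
  by_cases h : k = s
  · simp [h]
  · simp [h]
    exact fun hc => h (String.toList_inj.mp hc)
lemma get?_nil {v : Type} (x : String) : (PySem.Dict.mk ([] : List (String × v))).get? x = none := by
  simp [PySem.Dict.get?]
set_option maxRecDepth 8192 in
lemma core (s : String) :
    pvLoopA (PySem.Dict.ofList pvPhoneTable).items s
      = pvLookupB (PySem.Dict.ofList pvPhoneTable) s [3, 2, 1] := by
  have hd : (PySem.Dict.ofList pvPhoneTable) = PySem.Dict.mk pvPhoneTable := by decide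
  rw [hd]
  simp only [pvPhoneTable, pvLoopA, pvLookupB, PySem.Dict.get?_mk_cons, get?_nil,
    PySem.Str.startswith_eq, str_beq_toList, PySem.Str.toList_slice,
    PySem.Chars.slice_eq_listSlice]
  rw [show ((3:Int) = ((3:Nat):Int)) by rfl, show ((2:Int) = ((2:Nat):Int)) by rfl,
      show ((1:Int) = ((1:Nat):Int)) by rfl]
  simp only [PySem.List.slice_to_natCast]
  generalize s.toList = cs
  rcases cs with _ | ⟨c1, _ | ⟨c2, _ | ⟨c3, r⟩⟩⟩
  · simp [PySem.Chars.startswith]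
  · simp only [PySem.Chars.startswith, List.take]
    by_cases h1 : c1 = '1'
    · subst h1; simp [List.isPrefixOf]
    · simp [Ne.symm h1, List.isPrefixOf]
  · simp only [PySem.Chars.startswith, List.take]
    by_cases h1 : c1 = '5'
    · subst h1
      by_cases h2 : c2 = '2'
      · subst h2; simp [List.isPrefixOf]
      by_cases h3 : c2 = '7'
      · subst h3; simp [List.isPrefixOf]
      by_cases h4 : c2 = '1'
      · subst h4; simp [List.isPrefixOf]
      simp [Ne.symm h2, Ne.symm h3, Ne.symm h4, List.isPrefixOf]
    · by_cases h2 : c1 = '3'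
      · subst h2
        by_cases h3 : c2 = '4'
        · subst h3; simp [List.isPrefixOf]
        simp [Ne.symm h3, List.isPrefixOf]
      by_cases h3 : c1 = '1'
      · subst h3; simp [List.isPrefixOf]
      simp [Ne.symm h1, Ne.symm h2, Ne.symm h3, List.isPrefixOf]
  · simp only [PySem.Chars.startswith, List.take]
    by_cases h1 : c1 = '5'
    · subst h1
      by_cases h2 : c2 = '0'
      · subst h2
        by_cases h3 : c3 = '6'
        · subst h3; simp [List.isPrefixOf]
        by_cases h4 : c3 = '7'
        · subst h4; simp [List.isPrefixOf]
        by_cases h5 : c3 = '4'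
        · subst h5; simp [List.isPrefixOf]
        by_cases h6 : c3 = '3'
        · subst h6; simp [List.isPrefixOf]
        by_cases h7 : c3 = '2'
        · subst h7; simp [List.isPrefixOf]
        simp [Ne.symm h3, Ne.symm h4, Ne.symm h5, Ne.symm h6, Ne.symm h7,
          List.isPrefixOf]
      · by_cases h3 : c2 = '2'
        · subst h3; simp [List.isPrefixOf]
        by_cases h4 : c2 = '7'
        · subst h4; simp [List.isPrefixOf]
        by_cases h5 : c2 = '1'
        · subst h5; simp [List.isPrefixOf]
        simp [Ne.symm h2, Ne.symm h3, Ne.symm h4, Ne.symm h5,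
          List.isPrefixOf]
    · by_cases h2 : c1 = '3'
      · subst h2
        by_cases h3 : c2 = '4'
        · subst h3; simp [List.isPrefixOf]
        simp [Ne.symm h3, List.isPrefixOf]
      by_cases h3 : c1 = '1'
      · subst h3; simp [List.isPrefixOf]
      simp [Ne.symm h1, Ne.symm h2, Ne.symm h3, List.isPrefixOf]

-- ===== VERDICT (by name: the statement is the Claim_ definition above) =====
theorem detect_from_country_context_py_spec : Claim_equal_detect_from_country_context_py := by
  intro phone_number _hdom
  unfold Spec_detect_from_country_context_py detect_from_country_context_py detect_from_country_context_py_alt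
  exact core (pvClean phone_number)
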